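-- pv_equiv track=rewrite | github.com/bBelkiss/Python-Games | guessTS.py | revelar_letra
-- ===== SOURCE A (Python) =====
-- def revelar_letra(letra_cancion, letra_oculta, palabra_usuario, palabras_adivinadas):
--     palabra_usuario = palabra_usuario.lower()
--     letra_oculta_actualizada = ""
--
--     i = 0
--     while i < len(letra_cancion):
--         if letra_cancion[i].isalpha():
--             palabra_actual = ""
--             while i < len(letra_cancion) and letra_cancion[i].isalpha():
--                 palabra_actual += letra_cancion[i]
--                 i += 1
--
--             if palabra_actual.lower() in palabras_adivinadas:
--                 letra_oculta_actualizada += palabra_actual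
--             else:
--                 letra_oculta_actualizada += "_" * len(palabra_actual)
--         else:
--             letra_oculta_actualizada += letra_cancion[i]
--             i += 1
--
--     return letra_oculta_actualizada
-- ===== SOURCE B (Python) =====
-- def revelar_letra(letra_cancion, letra_oculta, palabra_usuario, palabras_adivinadas):
--     # Guess-driven reveal: collect the positions covered by a guessed word occurring
--     # as a whole word (non-letter or edge on both sides), then mask every other letter.
--     s = letra_cancion
--     n = len(s)
--
--     def ok(i, w):
--         m = len(w)
--         return (s[i:i + m].lower() == w
--                 and (i == 0 or not s[i - 1].isalpha())
--                 and (i + m == n or not s[i + m].isalpha()))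
--
--     reveal = {j
--               for w in palabras_adivinadas
--               if w and w.isalpha() and w == w.lower()
--               for i in range(n - len(w) + 1) if ok(i, w)
--               for j in range(i, i + len(w))}
--     return ''.join(c if not c.isalpha() or k in reveal else '_'
--                    for k, c in enumerate(s))
-- ===== Notes on version B (the rewrite author's own statement) =====
-- stated objective: alternative
-- what changed: Instead of A's single left-to-right scanner that peels off each alphabetic run and masks it, B searches the lyrics for whole-word occurrences of each guessed word, collects the covered positions into a set, and masks every letter position not in that set.
import Mathlib
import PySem

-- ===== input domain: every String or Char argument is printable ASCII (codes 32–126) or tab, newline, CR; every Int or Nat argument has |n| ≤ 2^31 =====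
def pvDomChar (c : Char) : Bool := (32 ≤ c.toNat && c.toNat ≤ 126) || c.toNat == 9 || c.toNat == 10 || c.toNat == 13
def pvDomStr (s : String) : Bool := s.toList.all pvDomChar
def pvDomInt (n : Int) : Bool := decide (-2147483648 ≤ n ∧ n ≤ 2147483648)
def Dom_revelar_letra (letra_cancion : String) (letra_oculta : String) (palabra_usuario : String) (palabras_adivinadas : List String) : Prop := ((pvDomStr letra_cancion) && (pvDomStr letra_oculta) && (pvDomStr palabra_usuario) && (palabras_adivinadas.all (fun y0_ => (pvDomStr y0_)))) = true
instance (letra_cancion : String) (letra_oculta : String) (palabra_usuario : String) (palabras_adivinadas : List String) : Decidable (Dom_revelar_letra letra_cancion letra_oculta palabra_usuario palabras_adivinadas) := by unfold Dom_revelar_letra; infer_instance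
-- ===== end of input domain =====

-- B replaces A's left-to-right run scanner with a guess-driven search: it collects the set of
-- positions covered by a whole-word occurrence of any guessed word and masks every other letter
-- (objective: alternative algorithm — driven by the guesses, not by scanning the text's runs).

-- ===== PORT A =====
-- inner while: consumes the maximal alphabetic prefix into palabra_actual
def pvA_inner : List Char → List Char → List Char × List Char
  | [], palabra => (palabra, [])
  | c :: rest, palabra =>
    if PySem.Chars.isalpha c then pvA_inner rest (palabra ++ [c]) else (palabra, c :: rest)

theorem pvA_inner_snd_le : ∀ (l w : List Char), (pvA_inner l w).2.length ≤ l.length := by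
  intro l
  induction l with
  | nil => intro w; simp [pvA_inner]
  | cons c rest ih =>
    intro w
    simp only [pvA_inner]
    split
    · exact Nat.le_succ_of_le (ih _)
    · simp

-- outer while over the remaining characters, accumulating letra_oculta_actualizada
def pvA_outer (pal : List String) : List Char → List Char → List Char
  | [], acc => acc
  | c :: rest, acc =>
    if h : PySem.Chars.isalpha c then
      let p := pvA_inner (c :: rest) []
      let acc' := if pal.contains (String.ofList (PySem.Chars.lower p.1))
                  then acc ++ p.1
                  else acc ++ List.replicate p.1.length '_'
      pvA_outer pal p.2 acc'
    else pvA_outer pal rest (acc ++ [c])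
  termination_by cs _ => cs.length
  decreasing_by
  · simp only [pvA_inner, if_pos h]
    exact Nat.lt_succ_of_le (pvA_inner_snd_le rest [c])
  · simp

def revelar_letra (letra_cancion : String) (letra_oculta : String) (palabra_usuario : String) (palabras_adivinadas : List String) : String :=
  let _palabra_usuario := PySem.Str.lower palabra_usuario   -- dead in A, kept for faithfulness
  String.ofList (pvA_outer palabras_adivinadas letra_cancion.toList [])

-- ===== PORT B =====
-- 'w and w.isalpha() and w == w.lower()' (the filter of the set comprehension)
def pvB_elig (w : String) : Bool :=
  !(w == "") && PySem.Str.strIsalpha w && (PySem.Str.lower w == w)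

-- 'ok(i, w)': s[i:i+len(w)].lower() == w with a non-letter (or the string edge) on both sides.
-- Python reads s[i-1] / s[i+m] only when in range ('or' short-circuits), so getD with a dummy
-- default is exact there.
def pvB_ok (cs : List Char) (w : List Char) (i : Nat) : Bool :=
  (PySem.Chars.lower (PySem.List.slice cs (some (i : Int)) (some ((i : Int) + w.length))) == w)
  && ((i == 0) || !PySem.Chars.isalpha (cs.getD (i - 1) ' '))
  && ((i + w.length == cs.length) || !PySem.Chars.isalpha (cs.getD (i + w.length) ' '))

-- the elements of the set comprehension, in generation order; the indices produced by
-- range(...) are nonnegative, so '.toNat' on them is exact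
def pvB_revealList (cs : List Char) (pal : List String) : List Int :=
  pal.flatMap (fun w =>
    if pvB_elig w then
      (PySem.List.pyRange 0 ((cs.length : Int) - w.toList.length + 1) 1).flatMap (fun i =>
        if pvB_ok cs w.toList i.toNat then PySem.List.pyRange i (i + w.toList.length) 1 else [])
    else [])

def revelar_letra_alt (letra_cancion : String) (letra_oculta : String) (palabra_usuario : String) (palabras_adivinadas : List String) : String :=
  let cs := letra_cancion.toList
  let reveal : PySem.Set Int := PySem.Set.ofList (pvB_revealList cs palabras_adivinadas)
  String.ofList ((PySem.List.enumerate cs 0).map (fun kc =>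
    if !PySem.Chars.isalpha kc.2 || PySem.Set.contains reveal kc.1 then kc.2 else '_'))

-- ===== PRECONDITION & SPEC =====
def Spec_revelar_letra (letra_cancion : String) (letra_oculta : String) (palabra_usuario : String) (palabras_adivinadas : List String) (out : String) : Prop := out = revelar_letra_alt letra_cancion letra_oculta palabra_usuario palabras_adivinadas
instance (letra_cancion : String) (letra_oculta : String) (palabra_usuario : String) (palabras_adivinadas : List String) (out : String) : Decidable (Spec_revelar_letra letra_cancion letra_oculta palabra_usuario palabras_adivinadas out) := by unfold Spec_revelar_letra; infer_instance

-- ===== CLAIM (what is proved, stated in full; the proofs are below) =====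
def Claim_equal_revelar_letra : Prop := ∀ (letra_cancion : String) (letra_oculta : String) (palabra_usuario : String) (palabras_adivinadas : List String), Dom_revelar_letra letra_cancion letra_oculta palabra_usuario palabras_adivinadas → Spec_revelar_letra letra_cancion letra_oculta palabra_usuario palabras_adivinadas (revelar_letra letra_cancion letra_oculta palabra_usuario palabras_adivinadas)

-- ===== LEMMAS AND PROOFS =====

-- canonical decomposition into maximal same-class (letter / non-letter) runs
def runsSpec : List Char → List (List Char)
  | [] => []
  | c :: rest =>
    (c :: rest.takeWhile (fun x => PySem.Chars.isalpha x == PySem.Chars.isalpha c)) ::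
      runsSpec (rest.dropWhile (fun x => PySem.Chars.isalpha x == PySem.Chars.isalpha c))
  termination_by cs => cs.length
  decreasing_by
    exact Nat.lt_succ_of_le (List.length_dropWhile_le _ _)

-- A's per-run masking, and A's whole result as masked runs
def pvMask (pal : List String) (run : List Char) : List Char :=
  if PySem.Chars.isalpha run.headI && !(pal.contains (String.ofList (PySem.Chars.lower run)))
  then List.replicate run.length '_' else run

def joinMask (pal : List String) (cs : List Char) : List Char :=
  ((runsSpec cs).map (pvMask pal)).flatten

theorem pvA_inner_spec : ∀ (l w : List Char),
    pvA_inner l w = (w ++ l.takeWhile PySem.Chars.isalpha, l.dropWhile PySem.Chars.isalpha) := by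
  intro l
  induction l with
  | nil => intro w; simp [pvA_inner]
  | cons c rest ih =>
    intro w
    by_cases h : PySem.Chars.isalpha c
    · simp [pvA_inner, h, ih]
    · simp [pvA_inner, h]

theorem joinMask_cons_nonalpha (pal : List String) (c : Char) (rest : List Char)
    (h : PySem.Chars.isalpha c = false) :
    joinMask pal (c :: rest) = c :: joinMask pal rest := by
  cases rest with
  | nil => simp [joinMask, runsSpec, pvMask, h]
  | cons d rest' =>
    by_cases hd : PySem.Chars.isalpha d
    · simp [joinMask, runsSpec, pvMask, h, hd]
    · simp only [Bool.not_eq_true] at hd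
      simp [joinMask, runsSpec, pvMask, h, hd]

theorem pvA_outer_eq (pal : List String) : ∀ (cs acc : List Char),
    pvA_outer pal cs acc = acc ++ joinMask pal cs := by
  intro cs acc
  induction cs, acc using pvA_outer.induct pal with
  | case1 => simp [pvA_outer, joinMask, runsSpec]
  | case2 c rest acc h p acc' ih =>
    simp only [p, acc'] at ih
    simp only [dite_eq_ite] at ih
    simp only [pvA_outer, dif_pos h]
    rw [ih]
    have hin : pvA_inner (c :: rest) [] =
        (c :: rest.takeWhile PySem.Chars.isalpha, rest.dropWhile PySem.Chars.isalpha) := by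
      simp [pvA_inner_spec, h]
    rw [hin]
    have hjm : joinMask pal (c :: rest) =
        pvMask pal (c :: rest.takeWhile PySem.Chars.isalpha)
          ++ joinMask pal (rest.dropWhile PySem.Chars.isalpha) := by
      simp [joinMask, runsSpec, h]
    rw [hjm]
    by_cases hc : String.ofList (PySem.Chars.lower (c :: rest.takeWhile PySem.Chars.isalpha)) ∈ pal
    · simp [pvMask, h, hc]
    · simp [pvMask, h, hc]
  | case3 c rest acc h ih =>
    simp only [Bool.not_eq_true] at h
    rw [pvA_outer, dif_neg (by simp [h]), ih, joinMask_cons_nonalpha pal c rest h]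
    simp

-- ---- character-class facts (Python's ASCII case mapping, as PySem defines it) ----

theorem pv_isupper_iff (c : Char) : PySem.Chars.isupper c = true ↔ (65 ≤ c.toNat ∧ c.toNat ≤ 90) := by
  unfold PySem.Chars.isupper
  rw [Bool.and_eq_true, decide_eq_true_iff, decide_eq_true_iff, Char.le_def, Char.le_def,
      UInt32.le_iff_toNat_le, UInt32.le_iff_toNat_le,
      show ('A').val.toNat = 65 by decide, show ('Z').val.toNat = 90 by decide]
  exact Iff.rfl

theorem pv_islower_iff (c : Char) : PySem.Chars.islower c = true ↔ (97 ≤ c.toNat ∧ c.toNat ≤ 122) := by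
  unfold PySem.Chars.islower
  rw [Bool.and_eq_true, decide_eq_true_iff, decide_eq_true_iff, Char.le_def, Char.le_def,
      UInt32.le_iff_toNat_le, UInt32.le_iff_toNat_le,
      show ('a').val.toNat = 97 by decide, show ('z').val.toNat = 122 by decide]
  exact Iff.rfl

theorem pv_toNat_ofNat_small (n : Nat) (h : n ≤ 200) : (Char.ofNat n).toNat = n := by
  have hv : n.isValidChar := Or.inl (by omega)
  simp [Char.ofNat, hv, Char.ofNatAux, Char.toNat]

theorem lowerChar_isalpha (c : Char) :
    PySem.Chars.isalpha (PySem.Chars.lowerChar c) = PySem.Chars.isalpha c := by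
  by_cases hu : PySem.Chars.isupper c = true
  · obtain ⟨h1, h2⟩ := (pv_isupper_iff c).mp hu
    have hl : PySem.Chars.islower (Char.ofNat (c.toNat + 32)) = true :=
      (pv_islower_iff _).mpr (by rw [pv_toNat_ofNat_small _ (by omega)]; omega)
    unfold PySem.Chars.lowerChar PySem.Chars.isalpha
    rw [if_pos hu, hl, hu]
    simp
  · unfold PySem.Chars.lowerChar
    rw [if_neg hu]

theorem lowerChar_lowerChar (c : Char) :
    PySem.Chars.lowerChar (PySem.Chars.lowerChar c) = PySem.Chars.lowerChar c := by
  by_cases hu : PySem.Chars.isupper c = true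
  · obtain ⟨h1, h2⟩ := (pv_isupper_iff c).mp hu
    have hnu : PySem.Chars.isupper (Char.ofNat (c.toNat + 32)) = false := by
      rw [Bool.eq_false_iff]
      intro hx
      obtain ⟨a, b⟩ := (pv_isupper_iff _).mp hx
      rw [pv_toNat_ofNat_small _ (by omega)] at a b
      omega
    unfold PySem.Chars.lowerChar
    rw [if_pos hu, if_neg (by rw [hnu]; exact Bool.false_ne_true)]
  · unfold PySem.Chars.lowerChar
    rw [if_neg hu, if_neg hu]

-- ---- the positional reveal predicate both programs are reduced to ----

-- positions i..i+m-1 form a maximal alphabetic run of cs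
def RunAt (cs : List Char) (i m : Nat) : Prop :=
  0 < m ∧ i + m ≤ cs.length ∧
  (∀ j, i ≤ j → j < i + m → PySem.Chars.isalpha (cs.getD j ' ') = true) ∧
  (i = 0 ∨ PySem.Chars.isalpha (cs.getD (i - 1) ' ') = false) ∧
  (i + m = cs.length ∨ PySem.Chars.isalpha (cs.getD (i + m) ' ') = false)

-- position k lies in a maximal run whose lowercasing is a guessed word
def MRev (cs : List Char) (pal : List String) (k : Nat) : Prop :=
  ∃ i m, i ≤ k ∧ k < i + m ∧ RunAt cs i m ∧
    String.ofList (PySem.Chars.lower ((cs.drop i).take m)) ∈ pal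

-- ---- L1: B's reveal set is exactly MRev ----

theorem ok_iff (cs : List Char) (w : String) (hw : pvB_elig w = true) (i : Nat) :
    pvB_ok cs w.toList i = true ↔
      (RunAt cs i w.toList.length ∧
        String.ofList (PySem.Chars.lower ((cs.drop i).take w.toList.length)) = w) := by
  obtain ⟨⟨hne, halpha⟩, hlow⟩ :
      ((w == "") = false ∧ PySem.Str.strIsalpha w = true) ∧ (PySem.Str.lower w == w) = true := by
    have := hw
    unfold pvB_elig at this
    simp only [Bool.and_eq_true, Bool.not_eq_true'] at this
    exact ⟨⟨this.1.1, this.1.2⟩, this.2⟩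
  have hwnil : w.toList ≠ [] := by
    intro h
    rw [show ([] : List Char) = ("" : String).toList from rfl, String.toList_inj] at h
    rw [h] at hne
    simp at hne
  have hm : 0 < w.toList.length := List.length_pos_iff.mpr hwnil
  have hall : ∀ c ∈ w.toList, PySem.Chars.isalpha c = true := by
    rw [PySem.Str.strIsalpha_eq] at halpha
    unfold PySem.Chars.strIsalpha at halpha
    simp only [Bool.and_eq_true, List.all_eq_true] at halpha
    intro c hc
    exact halpha.2 c hc
  have hlw : PySem.Chars.lower w.toList = w.toList := by
    have : PySem.Str.lower w = w := by simpa using hlow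
    rw [← PySem.Str.toList_lower, this]
  set m := w.toList.length with hmdef
  set S := (cs.drop i).take m with hSdef
  have hok : pvB_ok cs w.toList i = true ↔
      (PySem.Chars.lower S = w.toList ∧
       (i = 0 ∨ PySem.Chars.isalpha (cs.getD (i - 1) ' ') = false) ∧
       (i + m = cs.length ∨ PySem.Chars.isalpha (cs.getD (i + m) ' ') = false)) := by
    unfold pvB_ok
    rw [PySem.List.slice_natCast_add]
    simp only [Bool.and_eq_true, beq_iff_eq, Bool.or_eq_true, Bool.not_eq_true',
      Nat.beq_eq_true_eq, and_assoc]
    exact Iff.rfl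
  rw [hok]
  constructor
  · rintro ⟨hEq, hb1, hb2⟩
    have hSlen : S.length = m := by
      have := congrArg List.length hEq
      simpa [PySem.Chars.lower] using this
    have hle : i + m ≤ cs.length := by
      have h1 : S.length = min m (cs.length - i) := by
        simp [hSdef]
      omega
    refine ⟨⟨hm, hle, ?_, hb1, hb2⟩, by rw [hEq, String.ofList_toList]⟩
    intro j hj1 hj2
    have hjlt : j < cs.length := by omega
    have hidx : j - i < S.length := by omega
    have hSj : S[j - i]'hidx = cs[j]'hjlt := by
      simp only [hSdef]
      rw [List.getElem_take, List.getElem_drop]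
      congr 1
      omega
    have hwj : PySem.Chars.lowerChar (S[j - i]'hidx) = w.toList[j - i]'(by omega) := by
      have := congrArg (fun l => l[j - i]?) hEq
      simp only [PySem.Chars.lower, List.getElem?_map] at this
      have h1 : S[j - i]? = some (S[j - i]'hidx) := List.getElem?_eq_getElem hidx
      have h2 : w.toList[j - i]? = some (w.toList[j - i]'(by omega)) :=
        List.getElem?_eq_getElem (by omega)
      rw [h1, h2] at this
      simpa using this
    have : PySem.Chars.isalpha (S[j - i]'hidx) = true := by
      rw [← lowerChar_isalpha, hwj]
      exact hall _ (List.getElem_mem _)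
    rw [List.getD_eq_getElem cs ' ' hjlt, ← hSj]
    exact this
  · rintro ⟨⟨_, hle, _, hb1, hb2⟩, hofl⟩
    have hEq : PySem.Chars.lower S = w.toList := by
      have := congrArg String.toList hofl
      simpa [String.toList_ofList] using this
    exact ⟨hEq, hb1, hb2⟩

theorem revealList_iff (cs : List Char) (pal : List String) (k : Nat) :
    ((k : Int) ∈ pvB_revealList cs pal) ↔ MRev cs pal k := by
  unfold pvB_revealList
  rw [List.mem_flatMap]
  constructor
  · rintro ⟨w, hwpal, hmem⟩
    by_cases he : pvB_elig w = true
    · rw [if_pos he, List.mem_flatMap] at hmem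
      obtain ⟨ii, hiR, hk⟩ := hmem
      by_cases hok : pvB_ok cs w.toList ii.toNat = true
      · rw [if_pos hok, PySem.List.mem_pyRange_one] at hk
        rw [PySem.List.mem_pyRange_one] at hiR
        obtain ⟨hrun, hofl⟩ := (ok_iff cs w he ii.toNat).mp hok
        refine ⟨ii.toNat, w.toList.length, by omega, by omega, hrun, ?_⟩
        rw [hofl]
        exact hwpal
      · rw [if_neg hok] at hk
        simp at hk
    · rw [if_neg he] at hmem
      simp at hmem
  · rintro ⟨i, m, hik, hkim, hrun, hmem⟩
    obtain ⟨hm, hle, hal, hb1, hb2⟩ := hrun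
    set S := (cs.drop i).take m with hSdef
    have hSlen : S.length = m := by
      simp only [hSdef, List.length_take, List.length_drop]
      omega
    set w := String.ofList (PySem.Chars.lower S) with hwdef
    have hwtl : w.toList = PySem.Chars.lower S := String.toList_ofList
    have hml : w.toList.length = m := by
      rw [hwtl]
      simpa [PySem.Chars.lower] using hSlen
    have halphaS : ∀ c ∈ S, PySem.Chars.isalpha c = true := by
      intro c hc
      obtain ⟨j, hj, hcj⟩ := List.mem_iff_getElem.mp hc
      have hjlt : i + j < cs.length := by omega
      have : S[j]'hj = cs[i + j]'hjlt := by
        simp only [hSdef]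
        rw [List.getElem_take, List.getElem_drop]
      rw [← hcj, this, ← List.getD_eq_getElem cs ' ' hjlt]
      exact hal (i + j) (by omega) (by omega)
    have he : pvB_elig w = true := by
      unfold pvB_elig
      simp only [Bool.and_eq_true, Bool.not_eq_true']
      refine ⟨⟨?_, ?_⟩, ?_⟩
      · rw [beq_eq_false_iff_ne]
        intro hbad
        have h0 : w.toList = [] := by rw [hbad]; rfl
        rw [hwtl] at h0
        have h1 := congrArg List.length h0
        simp only [PySem.Chars.lower, List.length_map, List.length_nil] at h1
        omega
      · rw [PySem.Str.strIsalpha_eq]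
        unfold PySem.Chars.strIsalpha
        simp only [Bool.and_eq_true, List.all_eq_true]
        constructor
        · rw [hwtl]
          simp only [Bool.not_eq_true', List.isEmpty_eq_false_iff]
          intro hbad
          have h1 := congrArg List.length hbad
          simp only [PySem.Chars.lower, List.length_map, List.length_nil] at h1
          omega
        · intro c hc
          rw [hwtl] at hc
          simp only [PySem.Chars.lower, List.mem_map] at hc
          obtain ⟨c0, hc0, rfl⟩ := hc
          rw [lowerChar_isalpha]
          exact halphaS c0 hc0
      · rw [beq_iff_eq, ← String.toList_inj, PySem.Str.toList_lower, hwtl]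
        simp only [PySem.Chars.lower, List.map_map]
        apply List.map_congr_left
        intro c _
        exact lowerChar_lowerChar c
    refine ⟨w, hmem, ?_⟩
    rw [if_pos he, List.mem_flatMap]
    refine ⟨(i : Int), ?_, ?_⟩
    · rw [PySem.List.mem_pyRange_one, hml]
      constructor
      · exact Int.natCast_nonneg i
      · omega
    · have hi : ((i : Int)).toNat = i := Int.toNat_natCast i
      have hokB : pvB_ok cs w.toList ((i : Int)).toNat = true := by
        rw [hi]
        apply (ok_iff cs w he i).mpr
        rw [hml]
        exact ⟨⟨hm, hle, hal, hb1, hb2⟩, rfl⟩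
      rw [if_pos hokB, PySem.List.mem_pyRange_one, hml]
      omega

-- helper equalities
theorem pvMask_length (pal : List String) (run : List Char) :
    (pvMask pal run).length = run.length := by
  unfold pvMask
  split
  · simp
  · rfl

theorem contains_ofList (l : List Int) (x : Int) :
    List.contains (PySem.Set.ofList l) x = l.contains x := by
  by_cases h : x ∈ l
  · have h1 : x ∈ PySem.Set.ofList l := (PySem.Set.mem_ofList l x).mpr h
    simp [PySem.Set.contains, List.contains_iff_mem, h, h1]
  · have h1 : x ∉ PySem.Set.ofList l := fun hx => h ((PySem.Set.mem_ofList l x).mp hx)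
    simp [PySem.Set.contains, List.contains_iff_mem, h, h1]

-- ---- run-shift lemmas for MRev ----

theorem mrev_front (pal : List String) (r t : List Char) (hr : r ≠ [])
    (hcl : ∀ x ∈ r, PySem.Chars.isalpha x = true)
    (ht : t = [] ∨ PySem.Chars.isalpha (t.getD 0 ' ') = false)
    (k : Nat) (hk : k < r.length) :
    MRev (r ++ t) pal k ↔ String.ofList (PySem.Chars.lower r) ∈ pal := by
  have hL : 0 < r.length := List.length_pos_iff.mpr hr
  have hF2 : ∀ j, j < r.length → PySem.Chars.isalpha ((r ++ t).getD j ' ') = true := by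
    intro j hj
    rw [List.getD_append _ _ _ _ hj, List.getD_eq_getElem r ' ' hj]
    exact hcl _ (List.getElem_mem _)
  have hFt : t ≠ [] → (r ++ t).getD r.length ' ' = t.getD 0 ' ' := by
    intro _
    rw [List.getD_append_right _ _ _ _ (le_refl _), Nat.sub_self]
  constructor
  · rintro ⟨i, m, hik, hkim, ⟨hm, hle, hall, hb1, hb2⟩, hmem⟩
    have hiL : i < r.length := by omega
    have hi0 : i = 0 := by
      rcases hb1 with h0 | hb
      · exact h0
      · by_contra hne
        have : PySem.Chars.isalpha ((r ++ t).getD (i - 1) ' ') = true := hF2 _ (by omega)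
        rw [hb] at this
        exact Bool.false_ne_true this
    subst hi0
    simp only [Nat.zero_add] at hkim hle hall hb2 hmem
    have hmL : m ≤ r.length := by
      by_contra hgt
      push_neg at hgt
      have hLin : PySem.Chars.isalpha ((r ++ t).getD r.length ' ') = true :=
        hall r.length (by omega) (by omega)
      rcases ht with h | h
      · subst h
        simp only [List.append_nil, List.length_append, List.length_nil] at hle
        omega
      · have htne : t ≠ [] := by
          intro hbad
          subst hbad
          simp only [List.append_nil, List.length_append, List.length_nil] at hle
          omega
        rw [hFt htne, h] at hLin
        exact Bool.false_ne_true hLin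
    have hmEq : m = r.length := by
      rcases hb2 with hEnd | hb
      · rw [List.length_append] at hEnd
        omega
      · by_contra hne
        have : PySem.Chars.isalpha ((r ++ t).getD m ' ') = true := hF2 _ (by omega)
        rw [hb] at this
        exact Bool.false_ne_true this
    subst hmEq
    rwa [List.drop_zero, List.take_left] at hmem
  · intro hmem
    refine ⟨0, r.length, Nat.zero_le k, by omega, ⟨hL, by simp, ?_, Or.inl rfl, ?_⟩, ?_⟩
    · intro j _ hj
      exact hF2 j (by omega)
    · by_cases hte : t = []
      · subst hte
        exact Or.inl (by simp)
      · refine Or.inr ?_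
        have h0 : PySem.Chars.isalpha (t.getD 0 ' ') = false := by
          rcases ht with h | h
          · exact absurd h hte
          · exact h
        rw [Nat.zero_add, hFt hte]
        exact h0
    · rwa [List.drop_zero, List.take_left]

theorem mrev_shift (pal : List String) (r t : List Char) (b : Bool) (hr : r ≠ [])
    (hcl : ∀ x ∈ r, PySem.Chars.isalpha x = b)
    (ht : t = [] ∨ PySem.Chars.isalpha (t.getD 0 ' ') = !b)
    (k : Nat) :
    MRev (r ++ t) pal (r.length + k) ↔ MRev t pal k := by
  have hL : 0 < r.length := List.length_pos_iff.mpr hr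
  have hF1 : ∀ j, (r ++ t).getD (r.length + j) ' ' = t.getD j ' ' := by
    intro j
    rw [List.getD_append_right _ _ _ _ (by omega)]
    congr 1
    omega
  have hF2 : ∀ j, j < r.length → PySem.Chars.isalpha ((r ++ t).getD j ' ') = b := by
    intro j hj
    rw [List.getD_append _ _ _ _ hj, List.getD_eq_getElem r ' ' hj]
    exact hcl _ (List.getElem_mem _)
  have hF3 : ∀ i : Nat, (r ++ t).drop (r.length + i) = t.drop i := by
    intro i
    rw [List.drop_append]
    rw [List.drop_eq_nil_of_le (by omega), List.nil_append]
    congr 1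
    omega
  have hlen : (r ++ t).length = r.length + t.length := List.length_append ..
  constructor
  · rintro ⟨i, m, hik, hkim, ⟨hm, hle, hall, hb1, hb2⟩, hmem⟩
    have hiL : r.length ≤ i := by
      by_contra hlt
      push_neg at hlt
      cases hbv : b with
      | false =>
        have h1 : PySem.Chars.isalpha ((r ++ t).getD i ' ') = true := hall i (le_refl i) (by omega)
        have h2 : PySem.Chars.isalpha ((r ++ t).getD i ' ') = false := by
          rw [hF2 i hlt, hbv]
        rw [h2] at h1
        exact Bool.false_ne_true h1
      | true =>
        rcases hb1 with h0 | hb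
        · subst h0
          have hLlt : r.length < m := by omega
          have hLa : PySem.Chars.isalpha ((r ++ t).getD r.length ' ') = true :=
            hall r.length (by omega) (by omega)
          rcases ht with hte | hth
          · subst hte
            simp only [List.length_append, List.length_nil] at hle
            omega
          · have h10 := hF1 0
            rw [Nat.add_zero] at h10
            rw [h10, hth, hbv] at hLa
            simp at hLa
        · rcases Nat.eq_zero_or_pos i with h0 | hpos
          · subst h0
            have : PySem.Chars.isalpha ((r ++ t).getD 0 ' ') = true := hall 0 (le_refl 0) (by omega)
            simp only [Nat.zero_sub] at hb
            rw [hb] at this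
            exact Bool.false_ne_true this
          · have : PySem.Chars.isalpha ((r ++ t).getD (i - 1) ' ') = b := hF2 _ (by omega)
            rw [hb, hbv] at this
            exact (Bool.false_ne_true this)
    refine ⟨i - r.length, m, by omega, by omega, ⟨hm, by omega, ?_, ?_, ?_⟩, ?_⟩
    · intro j hj1 hj2
      rw [← hF1 j]
      exact hall (r.length + j) (by omega) (by omega)
    · rcases Nat.eq_or_lt_of_le hiL with hEq | hlt
      · exact Or.inl (by omega)
      · rcases hb1 with h0 | hb
        · omega
        · refine Or.inr ?_
          rw [← hF1 (i - r.length - 1)]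
          have : r.length + (i - r.length - 1) = i - 1 := by omega
          rw [this]
          exact hb
    · rcases hb2 with hEnd | hb
      · exact Or.inl (by omega)
      · refine Or.inr ?_
        rw [← hF1 (i - r.length + m)]
        have : r.length + (i - r.length + m) = i + m := by omega
        rw [this]
        exact hb
    · have : (r ++ t).drop i = t.drop (i - r.length) := by
        have h := hF3 (i - r.length)
        rw [show r.length + (i - r.length) = i by omega] at h
        exact h
      rwa [this] at hmem
  · rintro ⟨i, m, hik, hkim, ⟨hm, hle, hall, hb1, hb2⟩, hmem⟩
    have htne : t ≠ [] := by
      intro hbad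
      subst hbad
      simp only [List.length_nil] at hle
      omega
    refine ⟨r.length + i, m, by omega, by omega, ⟨hm, by omega, ?_, ?_, ?_⟩, ?_⟩
    · intro j hj1 hj2
      have : j = r.length + (j - r.length) := by omega
      rw [this, hF1]
      exact hall (j - r.length) (by omega) (by omega)
    · rcases Nat.eq_zero_or_pos i with h0 | hpos
      · subst h0
        cases hbv : b with
        | true =>
          exfalso
          have h1 : PySem.Chars.isalpha (t.getD 0 ' ') = true := hall 0 (le_refl 0) (by omega)
          rcases ht with hte | hth
          · exact htne hte
          · rw [hth, hbv] at h1
            simp at h1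
        | false =>
          refine Or.inr ?_
          have : r.length + 0 - 1 = r.length - 1 := by omega
          rw [this, hF2 _ (by omega), hbv]
      · refine Or.inr ?_
        have : r.length + i - 1 = r.length + (i - 1) := by omega
        rw [this, hF1]
        rcases hb1 with h0 | hb
        · omega
        · exact hb
    · rcases hb2 with hEnd | hb
      · exact Or.inl (by omega)
      · refine Or.inr ?_
        have : r.length + i + m = r.length + (i + m) := by omega
        rw [this, hF1]
        exact hb
    · rwa [hF3]

-- ---- L2: A's masked runs agree positionally with B's reveal set ----

theorem joinMask_length (pal : List String) : ∀ (cs : List Char),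
    (joinMask pal cs).length = cs.length := by
  intro cs
  induction cs using runsSpec.induct with
  | case1 => simp [joinMask, runsSpec]
  | case2 c rest ih =>
    have hjm : joinMask pal (c :: rest) =
        pvMask pal (c :: rest.takeWhile (fun x => PySem.Chars.isalpha x == PySem.Chars.isalpha c))
          ++ joinMask pal (rest.dropWhile (fun x => PySem.Chars.isalpha x == PySem.Chars.isalpha c)) := by
      unfold joinMask
      rw [runsSpec]
      simp
    rw [hjm, List.length_append, pvMask_length, ih]
    have := congrArg List.length
      (List.takeWhile_append_dropWhile
        (p := fun x => PySem.Chars.isalpha x == PySem.Chars.isalpha c) (l := rest))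
    simp only [List.length_append] at this
    simp only [List.length_cons]
    omega

theorem joinMask_getD (pal : List String) : ∀ (cs : List Char) (k : Nat), k < cs.length →
    (joinMask pal cs).getD k ' ' =
      (if !PySem.Chars.isalpha (cs.getD k ' ') || (pvB_revealList cs pal).contains (k : Int)
       then cs.getD k ' ' else '_') := by
  intro cs
  induction cs using runsSpec.induct with
  | case1 => intro k hk; simp at hk
  | case2 c rest ih =>
    intro k hk
    set p := fun x => PySem.Chars.isalpha x == PySem.Chars.isalpha c with hp
    set r := c :: rest.takeWhile p with hrdef
    set t := rest.dropWhile p with htdef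
    have hcs : c :: rest = r ++ t := by
      rw [hrdef, htdef, List.cons_append, List.takeWhile_append_dropWhile]
    have hrne : r ≠ [] := by simp [hrdef]
    have hrcl : ∀ x ∈ r, PySem.Chars.isalpha x = PySem.Chars.isalpha c := by
      intro x hx
      rcases List.mem_cons.mp hx with h | h
      · rw [h]
      · have := List.mem_takeWhile_imp h
        rw [hp] at this
        simpa using this
    have htch : t = [] ∨ PySem.Chars.isalpha (t.getD 0 ' ') = !PySem.Chars.isalpha c := by
      rcases hte : t with _ | ⟨d, td⟩
      · exact Or.inl rfl
      · refine Or.inr ?_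
        have h2 : rest.dropWhile p = d :: td := by rw [← htdef]; exact hte
        have hpd : p d = false := by
          have hne' : rest.dropWhile p ≠ [] := by rw [h2]; simp
          have h5 := List.head_dropWhile_not p hne'
          revert hne' h5
          rw [h2]
          intro hne' h5
          rwa [List.head_cons] at h5
        have hpd' : (PySem.Chars.isalpha d == PySem.Chars.isalpha c) = false := hpd
        simp only [hte, List.getD_cons_zero]
        exact Bool.eq_not_iff.mpr (ne_of_beq_false hpd')
    have hjm : joinMask pal (c :: rest) = pvMask pal r ++ joinMask pal t := by
      unfold joinMask
      rw [runsSpec]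
      simp [hrdef, htdef, hp]
    have hklen : k < (r ++ t).length := by rw [← hcs]; exact hk
    have hcond : ∀ k', ((pvB_revealList (c :: rest) pal).contains ((k' : Nat) : Int) = true) ↔
        MRev (c :: rest) pal k' := by
      intro k'
      rw [List.contains_iff_mem]
      exact revealList_iff (c :: rest) pal k'
    rcases Nat.lt_or_ge k r.length with hkL | hkL
    · rw [hjm, List.getD_append _ _ _ _ (by rw [pvMask_length]; exact hkL)]
      have hck : (c :: rest).getD k ' ' = r.getD k ' ' := by
        rw [hcs]
        exact List.getD_append _ _ _ _ hkL
      by_cases hc : PySem.Chars.isalpha c = true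
      · have hkalpha : PySem.Chars.isalpha ((c :: rest).getD k ' ') = true := by
          rw [hck, List.getD_eq_getElem r ' ' hkL, hrcl _ (List.getElem_mem _), hc]
        have hfront : MRev (c :: rest) pal k ↔ String.ofList (PySem.Chars.lower r) ∈ pal := by
          rw [hcs]
          exact mrev_front pal r t hrne
            (by intro x hx; rw [hrcl x hx]; exact hc)
            (by rcases htch with h | h
                · exact Or.inl h
                · exact Or.inr (by rw [h, hc]; rfl))
            k hkL
        by_cases hmem : String.ofList (PySem.Chars.lower r) ∈ pal
        · have hmask : pvMask pal r = r := by
            unfold pvMask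
            rw [if_neg]
            simp only [Bool.and_eq_true, Bool.not_eq_true', not_and]
            intro _
            simp [List.contains_iff_mem, hmem]
          have hrev : (pvB_revealList (c :: rest) pal).contains ((k : Nat) : Int) = true :=
            (hcond k).mpr (hfront.mpr hmem)
          rw [hmask, hkalpha, hrev, ← hck]
          simp
        · have hmask : pvMask pal r = List.replicate r.length '_' := by
            unfold pvMask
            rw [if_pos]
            rw [hrdef]
            simp only [List.headI_cons, hc, Bool.true_and, Bool.not_eq_true']
            rw [← hrdef]
            by_cases hcon : (pal.contains (String.ofList (PySem.Chars.lower r))) = true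
            · exfalso
              rw [List.contains_iff_mem] at hcon
              exact hmem hcon
            · simpa using hcon
          have hrev : (pvB_revealList (c :: rest) pal).contains ((k : Nat) : Int) = false := by
            rw [Bool.eq_false_iff]
            intro hx
            exact hmem (hfront.mp ((hcond k).mp hx))
          rw [hmask, hkalpha, hrev, List.getD_replicate _ hkL]
          simp
      · have hfalse : PySem.Chars.isalpha c = false := by simpa using hc
        have hkalpha : PySem.Chars.isalpha ((c :: rest).getD k ' ') = false := by
          rw [hck, List.getD_eq_getElem r ' ' hkL, hrcl _ (List.getElem_mem _), hfalse]
        have hmask : pvMask pal r = r := by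
          unfold pvMask
          rw [if_neg]
          rw [hrdef]
          simp only [List.headI_cons, hfalse]
          simp
        rw [hmask, hkalpha, ← hck]
        simp
    · have hkt : k - r.length < t.length := by
        have := congrArg List.length hcs
        simp only [List.length_append] at this
        omega
      rw [hjm, List.getD_append_right _ _ _ _ (by rw [pvMask_length]; exact hkL), pvMask_length]
      rw [ih (k - r.length) hkt]
      have hgd : (c :: rest).getD k ' ' = t.getD (k - r.length) ' ' := by
        rw [hcs]
        exact List.getD_append_right _ _ _ _ hkL
      have hsplit : r.length + (k - r.length) = k := by omega
      have hshift : MRev (c :: rest) pal k ↔ MRev t pal (k - r.length) := by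
        rw [hcs]
        have := mrev_shift pal r t (PySem.Chars.isalpha c) hrne hrcl htch (k - r.length)
        rwa [hsplit] at this
      have hcondt : ((pvB_revealList t pal).contains ((k - r.length : Nat) : Int) = true) ↔
          MRev t pal (k - r.length) := by
        rw [List.contains_iff_mem]
        exact revealList_iff t pal (k - r.length)
      have hbeq : (pvB_revealList t pal).contains ((k - r.length : Nat) : Int) =
          (pvB_revealList (c :: rest) pal).contains ((k : Nat) : Int) := by
        cases hx : (pvB_revealList (c :: rest) pal).contains ((k : Nat) : Int) with
        | true =>
          have := (hcond k).mp hx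
          exact (hcondt.mpr (hshift.mp this))
        | false =>
          rw [Bool.eq_false_iff]
          intro hy
          have := (hcond k).mpr (hshift.mpr (hcondt.mp hy))
          rw [hx] at this
          exact Bool.false_ne_true this
      rw [hgd, hbeq]

-- ===== VERDICT (by name: the statement is the Claim_ definition above) =====
theorem revelar_letra_spec : Claim_equal_revelar_letra := by
  intro lc lo pu pal _
  unfold Spec_revelar_letra revelar_letra revelar_letra_alt
  refine congrArg String.ofList ?_
  rw [pvA_outer_eq, List.nil_append]
  apply List.ext_getElem
  · rw [joinMask_length, List.length_map, PySem.List.length_enumerate]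
  · intro k h1 h2
    have hk : k < lc.toList.length := by
      rw [joinMask_length] at h1
      exact h1
    rw [List.getElem_map, PySem.List.getElem_enumerate lc.toList 0 k
      (by rw [PySem.List.length_enumerate]; exact hk)]
    rw [← List.getD_eq_getElem (joinMask pal lc.toList) ' ' h1, joinMask_getD pal lc.toList k hk]
    simp only [zero_add, PySem.Set.contains]
    rw [contains_ofList, List.getD_eq_getElem lc.toList ' ' hk]
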